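-- pv_equiv track=rewrite | github.com/jonatas2014/Fundamentos_Teoricos_da_Computacao_2019_2 | Projeto prático 2/projeto_pratico_2.py | so_tem_um_simbolo
-- ===== SOURCE A (Python) =====
-- def so_tem_um_simbolo(string):
--     contraparte = ""
--     simbolo = string[0]
--     if simbolo == '(':
--         contraparte = ')'
--     elif simbolo == '[':
--         contraparte = ']'
--     elif simbolo == '{':
--         contraparte = '}'
--     i = 1
--     while (i < len(string)):
--         if (string[i] != simbolo) and (string[i] != contraparte):
--             return False
--         i += 1
--     return True
-- ===== SOURCE B (Python) =====
-- def so_tem_um_simbolo(string):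
--     simbolo = string[0]
--     contraparte = {'(': ')', '[': ']', '{': '}'}.get(simbolo, '')
--     total = string.count(simbolo)
--     if contraparte:
--         total += string.count(contraparte)
--     return total == len(string)
-- ===== Notes on version B (the rewrite author's own statement) =====
-- stated objective: alternative
-- what changed: Replaces A's guarded per-character scan with early return by a counting strategy: count occurrences of simbolo and of its counterpart and compare the sum with len(string); correct because the counterpart always differs from simbolo.
-- outside the precondition, e.g. on so_tem_um_simbolo(''): A raises IndexError, B raises IndexError
import Mathlib
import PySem

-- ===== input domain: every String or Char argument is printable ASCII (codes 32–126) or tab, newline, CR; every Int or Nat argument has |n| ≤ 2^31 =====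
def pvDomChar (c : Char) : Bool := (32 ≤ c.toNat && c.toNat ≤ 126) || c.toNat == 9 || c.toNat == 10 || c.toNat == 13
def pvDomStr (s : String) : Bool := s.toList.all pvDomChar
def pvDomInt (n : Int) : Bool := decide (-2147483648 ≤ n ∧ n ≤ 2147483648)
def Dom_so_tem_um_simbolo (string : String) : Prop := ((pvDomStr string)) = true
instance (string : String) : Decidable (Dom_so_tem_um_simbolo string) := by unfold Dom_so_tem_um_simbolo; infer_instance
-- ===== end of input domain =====

-- B replaces A's guarded index loop (scan with early return) by counting: it counts the
-- occurrences of simbolo and of its counterpart and compares the sum with the length;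
-- return values agree on every non-empty string (both raise IndexError on "").

-- ===== PORT A =====
-- contraparte is a Python string that is either "" or a closing bracket; a 1-char string
-- string[i] equals "" never, so we model contraparte exactly as Option Char (none = "").
def soTemUmSimboloLoopA (simbolo : Char) (contraparte : Option Char) : List Char → Bool
  | [] => true
  | c :: rest =>
      if c ≠ simbolo ∧ some c ≠ contraparte then false
      else soTemUmSimboloLoopA simbolo contraparte rest

def so_tem_um_simbolo (string : String) : Bool :=
  match string.toList with
  | [] => false   -- string[0] raises IndexError in Python; excluded by Pre_
  | simbolo :: rest =>
      let contraparte : Option Char :=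
        if simbolo = '(' then some ')'
        else if simbolo = '[' then some ']'
        else if simbolo = '{' then some '}'
        else none
      soTemUmSimboloLoopA simbolo contraparte rest

-- ===== PORT B =====
-- str.count of a single character is List.count over the characters; the dict .get
-- becomes the matching lookup, '' becomes none (the 'if contraparte:' false branch).
def so_tem_um_simbolo_alt (string : String) : Bool :=
  match string.toList with
  | [] => false   -- string[0] raises IndexError in Python; excluded by Pre_
  | simbolo :: _ =>
      let contraparte : Option Char :=
        if simbolo = '(' then some ')'
        else if simbolo = '[' then some ']'
        else if simbolo = '{' then some '}'
        else none
      let total :=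
        match contraparte with
        | some c => string.toList.count simbolo + string.toList.count c
        | none => string.toList.count simbolo
      total == string.toList.length

-- ===== PRECONDITION & SPEC =====
-- Pre_ excludes only the empty string, on which A (and B) raise IndexError at string[0].
def Pre_so_tem_um_simbolo (string : String) : Prop := string.toList ≠ []
instance (string : String) : Decidable (Pre_so_tem_um_simbolo string) := by
  unfold Pre_so_tem_um_simbolo; infer_instance

def pvWitness_so_tem_um_simbolo : String := "(()("

def Spec_so_tem_um_simbolo (string : String) (out : Bool) : Prop := out = so_tem_um_simbolo_alt string
instance (string : String) (out : Bool) : Decidable (Spec_so_tem_um_simbolo string out) := by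
  unfold Spec_so_tem_um_simbolo; infer_instance

-- ===== CLAIM (what is proved, stated in full; the proofs are below) =====
def Claim_equal_so_tem_um_simbolo : Prop := ∀ (string : String), Dom_so_tem_um_simbolo string → Pre_so_tem_um_simbolo string → Spec_so_tem_um_simbolo string (so_tem_um_simbolo string)

-- ===== LEMMAS AND PROOFS =====

-- A's loop is an 'all' over the remaining characters.
theorem loopA_eq_all (simbolo : Char) (cp : Option Char) (l : List Char) :
    soTemUmSimboloLoopA simbolo cp l
      = l.all (fun c => decide (c = simbolo ∨ some c = cp)) := by
  induction l with
  | nil => rfl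
  | cons c rest ih =>
      simp only [soTemUmSimboloLoopA, List.all_cons, ih]
      by_cases h : c ≠ simbolo ∧ some c ≠ cp
      · simp [h]
      · by_cases hc : c = simbolo
        · simp [hc]
        · have : some c = cp := by tauto
          simp [this]

-- two distinct characters are never counted together more often than the length
theorem count_add_le (a b : Char) (hab : a ≠ b) (l : List Char) :
    l.count a + l.count b ≤ l.length := by
  induction l with
  | nil => simp
  | cons c t ih =>
      rw [List.length_cons]
      by_cases hca : c = a
      · rw [hca, List.count_cons_self, List.count_cons_of_ne hab]; omega
      · by_cases hcb : c = b
        · rw [hcb, List.count_cons_self, List.count_cons_of_ne (Ne.symm hab)]; omega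
        · rw [List.count_cons_of_ne hca, List.count_cons_of_ne hcb]; omega

-- counting two distinct characters exhausts the length iff every character is one of them
theorem count_two_eq_length (a b : Char) (hab : a ≠ b) (l : List Char) :
    (l.count a + l.count b = l.length) ↔ ∀ c ∈ l, c = a ∨ c = b := by
  induction l with
  | nil => simp
  | cons c t ih =>
      have hle := count_add_le a b hab t
      simp only [List.mem_cons, forall_eq_or_imp, ← ih, List.length_cons]
      by_cases hca : c = a
      · rw [hca, List.count_cons_self, List.count_cons_of_ne hab]
        constructor
        · intro h2; exact ⟨Or.inl rfl, by omega⟩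
        · rintro ⟨-, h2⟩; omega
      · by_cases hcb : c = b
        · rw [hcb, List.count_cons_self, List.count_cons_of_ne (Ne.symm hab)]
          constructor
          · intro h2; exact ⟨Or.inr rfl, by omega⟩
          · rintro ⟨-, h2⟩; omega
        · rw [List.count_cons_of_ne hca, List.count_cons_of_ne hcb]
          constructor
          · intro h2; exact absurd h2 (by omega)
          · rintro ⟨hor, -⟩
            rcases hor with h | h
            · exact absurd h hca
            · exact absurd h hcb

-- counting one character exhausts the length iff every character equals it
theorem count_one_eq_length (a : Char) (l : List Char) :
    (l.count a = l.length) ↔ ∀ c ∈ l, c = a := by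
  induction l with
  | nil => simp
  | cons c t ih =>
      have hle := List.count_le_length (l := t) (a := a)
      simp only [List.mem_cons, forall_eq_or_imp, ← ih, List.length_cons]
      by_cases hca : c = a
      · rw [hca, List.count_cons_self]
        constructor
        · intro h2; exact ⟨rfl, by omega⟩
        · rintro ⟨-, h2⟩; omega
      · rw [List.count_cons_of_ne hca]
        constructor
        · intro h2; exact absurd h2 (by omega)
        · rintro ⟨h2, -⟩; exact absurd h2 hca

-- B's count test over s :: rest, bracket head: a membership test over rest
theorem B_head (s c' : Char) (h : s ≠ c') (rest : List Char) :
    ((List.count s (s :: rest) + List.count c' (s :: rest)) == (s :: rest).length)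
      = rest.all (fun c => decide (c = s ∨ c = c')) := by
  rw [Bool.eq_iff_iff, beq_iff_eq, List.all_eq_true, List.count_cons_self,
    List.count_cons_of_ne h, List.length_cons]
  rw [show (rest.count s + 1 + rest.count c' = rest.length + 1)
      ↔ (rest.count s + rest.count c' = rest.length) from by omega]
  rw [count_two_eq_length s c' h rest]
  simp

-- B's count test over s :: rest, non-bracket head
theorem B_head_one (s : Char) (rest : List Char) :
    ((List.count s (s :: rest)) == (s :: rest).length)
      = rest.all (fun c => decide (c = s)) := by
  rw [Bool.eq_iff_iff, beq_iff_eq, List.all_eq_true, List.count_cons_self, List.length_cons]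
  rw [show (rest.count s + 1 = rest.length + 1) ↔ (rest.count s = rest.length) from by omega]
  rw [count_one_eq_length s rest]
  simp

-- ===== VERDICT (by name: the statement is the Claim_ definition above) =====
theorem so_tem_um_simbolo_spec : Claim_equal_so_tem_um_simbolo := by
  intro string _ _
  unfold Spec_so_tem_um_simbolo so_tem_um_simbolo so_tem_um_simbolo_alt
  cases hs : string.toList with
  | nil => rfl
  | cons s rest =>
      by_cases h1 : s = '('
      · subst h1
        show soTemUmSimboloLoopA '(' (some ')') rest
          = ((List.count '(' ('(' :: rest) + List.count ')' ('(' :: rest)) == ('(' :: rest).length)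
        rw [loopA_eq_all, B_head '(' ')' (by decide) rest]
        simp
      · by_cases h2 : s = '['
        · subst h2
          show soTemUmSimboloLoopA '[' (some ']') rest
            = ((List.count '[' ('[' :: rest) + List.count ']' ('[' :: rest)) == ('[' :: rest).length)
          rw [loopA_eq_all, B_head '[' ']' (by decide) rest]
          simp
        · by_cases h3 : s = '{'
          · subst h3
            show soTemUmSimboloLoopA '{' (some '}') rest
              = ((List.count '{' ('{' :: rest) + List.count '}' ('{' :: rest)) == ('{' :: rest).length)
            rw [loopA_eq_all, B_head '{' '}' (by decide) rest]
            simp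
          · show soTemUmSimboloLoopA s
                (if s = '(' then some ')' else if s = '[' then some ']'
                 else if s = '{' then some '}' else none) rest
              = ((match (if s = '(' then some ')' else if s = '[' then some ']'
                    else if s = '{' then some '}' else none) with
                  | some c => List.count s (s :: rest) + List.count c (s :: rest)
                  | none => List.count s (s :: rest)) == (s :: rest).length)
            rw [if_neg h1, if_neg h2, if_neg h3]
            show soTemUmSimboloLoopA s none rest
              = ((List.count s (s :: rest)) == (s :: rest).length)
            rw [loopA_eq_all, B_head_one s rest]
            simp
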